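-- pv_equiv track=rewrite | github.com/R1cK-ChaN/analyst-project | src/analyst/delivery/soul.py | _companion_context_has_schedule
-- ===== SOURCE A (Python) =====
-- def _companion_context_has_schedule(local_context: str) -> bool:
--     if not local_context:
--         return False
--     return any(
--         token in local_context
--         for token in ("morning_plan", "lunch_plan", "afternoon_plan",
--                       "dinner_plan", "evening_plan", "current_plan", "schedule")
--     )
-- ===== SOURCE B (Python) =====
-- _SCHEDULE_TOKENS = ("morning_plan", "lunch_plan", "afternoon_plan",
--                     "dinner_plan", "evening_plan", "current_plan", "schedule")
--
--
-- def _companion_context_has_schedule(local_context: str) -> bool: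
--     # Single left-to-right scan: at each position test all tokens at once
--     # via str.startswith's tuple form.
--     for i in range(len(local_context)):
--         if local_context.startswith(_SCHEDULE_TOKENS, i):
--             return True
--     return False
-- ===== Notes on version B (the rewrite author's own statement) =====
-- stated objective: alternative
-- what changed: Replaces the per-token membership loop (one full substring search per token) by a single left-to-right scan over positions that tests all tokens at once with the tuple form of str.startswith; the empty-string guard disappears because the scan has no iterations on an empty string.
import Mathlib
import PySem

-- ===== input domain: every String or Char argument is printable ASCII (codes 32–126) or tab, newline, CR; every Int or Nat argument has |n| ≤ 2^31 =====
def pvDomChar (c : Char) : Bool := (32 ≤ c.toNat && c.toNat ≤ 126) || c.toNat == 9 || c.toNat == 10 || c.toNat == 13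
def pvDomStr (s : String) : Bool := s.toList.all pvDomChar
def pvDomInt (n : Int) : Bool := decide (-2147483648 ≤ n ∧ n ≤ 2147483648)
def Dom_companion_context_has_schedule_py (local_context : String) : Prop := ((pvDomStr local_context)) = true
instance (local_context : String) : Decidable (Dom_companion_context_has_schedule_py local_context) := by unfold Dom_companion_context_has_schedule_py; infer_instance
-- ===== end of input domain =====

-- B replaces the per-token substring loop by a single positional scan testing all tokens
-- at once at each position (str.startswith tuple form); idiomatic, same asymptotic cost.


-- the tuple of schedule tokens, shared by both ports
def pvTokens : List String := ["morning_plan", "lunch_plan", "afternoon_plan",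
                               "dinner_plan", "evening_plan", "current_plan", "schedule"]

-- ===== PORT A =====
def companion_context_has_schedule_py (local_context : String) : Bool :=
  if PySem.Str.len local_context == 0 then false
  else pvTokens.any (fun token => PySem.Str.isIn token local_context)

-- ===== PORT B =====
-- the positional scan of Source B: for each position (suffix), startswith any token
def pvScan : List Char → Bool
  | [] => false
  | c :: rest =>
      (pvTokens.any (fun t => PySem.Chars.startswith (c :: rest) t.toList)) || pvScan rest

def companion_context_has_schedule_py_alt (local_context : String) : Bool :=
  pvScan local_context.toList

-- ===== PRECONDITION & SPEC =====
def Spec_companion_context_has_schedule_py (local_context : String) (out : Bool) : Prop := out = companion_context_has_schedule_py_alt local_context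
instance (local_context : String) (out : Bool) : Decidable (Spec_companion_context_has_schedule_py local_context out) := by unfold Spec_companion_context_has_schedule_py; infer_instance

-- ===== CLAIM (what is proved, stated in full; the proofs are below) =====
def Claim_equal_companion_context_has_schedule_py : Prop := ∀ (local_context : String), Dom_companion_context_has_schedule_py local_context → Spec_companion_context_has_schedule_py local_context (companion_context_has_schedule_py local_context)

-- ===== LEMMAS AND PROOFS =====
lemma pvScan_iff (cs : List Char) :
    pvScan cs = true ↔ ∃ t ∈ pvTokens, t.toList <:+: cs := by
  induction cs with
  | nil => simp [pvScan]; decide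
  | cons c rest ih =>
      simp only [pvScan, Bool.or_eq_true, List.any_eq_true,
                 PySem.Chars.startswith_iff, ih]
      constructor
      · rintro (⟨t, ht, hp⟩ | ⟨t, ht, hi⟩)
        · exact ⟨t, ht, hp.isInfix⟩
        · exact ⟨t, ht, hi.trans (List.suffix_cons c rest).isInfix⟩
      · rintro ⟨t, ht, hi⟩
        rcases (List.infix_cons_iff.mp hi) with hp | hi'
        · exact Or.inl ⟨t, ht, hp⟩
        · exact Or.inr ⟨t, ht, hi'⟩

lemma pvScan_eq_any (cs : List Char) :
    pvScan cs = pvTokens.any (fun t => PySem.Chars.isIn t.toList cs) := by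
  rcases h : pvTokens.any (fun t => PySem.Chars.isIn t.toList cs) with _ | _
  · rw [Bool.eq_false_iff]
    intro hc
    rcases (pvScan_iff cs).mp hc with ⟨t, ht, hi⟩
    have : pvTokens.any (fun t => PySem.Chars.isIn t.toList cs) = true :=
      List.any_eq_true.mpr ⟨t, ht, (PySem.Chars.isIn_iff_infix _ _).mpr hi⟩
    simp [h] at this
  · rcases List.any_eq_true.mp h with ⟨t, ht, hi⟩
    exact (pvScan_iff cs).mpr ⟨t, ht, (PySem.Chars.isIn_iff_infix _ _).mp hi⟩

-- ===== VERDICT (by name: the statement is the Claim_ definition above) =====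
theorem companion_context_has_schedule_py_spec : Claim_equal_companion_context_has_schedule_py := by
  intro s _
  unfold Spec_companion_context_has_schedule_py
  unfold companion_context_has_schedule_py companion_context_has_schedule_py_alt
  rw [pvScan_eq_any]
  by_cases h : s = ""
  · simp [h]
    decide
  · simp [PySem.Str.isIn_eq]
    exact fun _ _ _ => h
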